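-- pv_equiv track=rewrite | github.com/ASmith37/job-app-quiz | redacted_quiz.py | determine_likely_offsets
-- ===== SOURCE A (Python) =====
-- def is_number_an_ascii_char(number):
--     # We think that the message will mostly be letters A-Z a-z and spaces
--     # Those letters are ASCII characters 65-90 and 97-122
--     # spaces are 32
--     # For any given number, say if it represents an ASCII letter
--     return (number >= 65 and number <= 90) or (number >= 97 and number <= 122) or number == 32
--
-- def un_offset(number, offset):
--     return (number + 256 - offset) % 256
--
-- def determine_likely_offsets(number_list):
--     # given a list of numbers encoded with a single offset
--     # determine the likely offsets used to encode them
--     #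
--     # return a dict of the 10 or so most likely offsets
--     # this will be {offset(int): letter_count(int), ...}
--     letter_counts = {}
--     for offset in range(0, 255):
--         adjusted_letters = list(map(lambda x: un_offset(x, offset), number_list))
--         # That's one way of making a partial function...
--         letter_counts[offset] = list(map(is_number_an_ascii_char, adjusted_letters)).count(True)
--     # Now we have a dict of 256 offsets and ascii character counts
--     # We can't use 256, so we'll throw away the less likely ones
--     desired_offset_count = 5
--     # lower the cutoff criteria until we have at least that many likely offsets
--     # start at the highest letter for any offset
--     for cutoff in range(max(letter_counts.values()), 0, -1):
--         # select only those offsets with ASCII letter counts above the cutoff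
--         likely_offsets = {k: v for i, (k,v) in enumerate(letter_counts.items()) if v >= cutoff}
--         # if we have enough for our liking
--         if len(likely_offsets) > desired_offset_count:
--             return likely_offsets
--     return {}
-- ===== SOURCE B (Python) =====
-- def determine_likely_offsets(number_list):
--     # Same result as the original: per-offset letter counts over offsets 0..254,
--     # then the offsets whose count reaches the 6th-largest count, provided it is positive.
--     def is_letter(n):
--         return 65 <= n <= 90 or 97 <= n <= 122 or n == 32
--     counts = [sum(1 for x in number_list if is_letter((x + 256 - off) % 256))
--               for off in range(255)]
--     # A's cutoff loop returns at the largest cutoff with more than 5 qualifying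
--     # offsets; that cutoff is exactly the 6th-largest count (when positive).
--     threshold = sorted(counts, reverse=True)[5]
--     if threshold < 1:
--         return {}
--     return {off: c for off, c in enumerate(counts) if c >= threshold}
-- ===== Notes on version B (the rewrite author's own statement) =====
-- stated objective: alternative
-- what changed: The descending cutoff loop that rebuilds a dict comprehension for every cutoff value is replaced by one sort of the 255 counts: the returned cutoff is exactly the 6th-largest count when positive, so B sorts once, reads that order statistic, and filters once.
import Mathlib
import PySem

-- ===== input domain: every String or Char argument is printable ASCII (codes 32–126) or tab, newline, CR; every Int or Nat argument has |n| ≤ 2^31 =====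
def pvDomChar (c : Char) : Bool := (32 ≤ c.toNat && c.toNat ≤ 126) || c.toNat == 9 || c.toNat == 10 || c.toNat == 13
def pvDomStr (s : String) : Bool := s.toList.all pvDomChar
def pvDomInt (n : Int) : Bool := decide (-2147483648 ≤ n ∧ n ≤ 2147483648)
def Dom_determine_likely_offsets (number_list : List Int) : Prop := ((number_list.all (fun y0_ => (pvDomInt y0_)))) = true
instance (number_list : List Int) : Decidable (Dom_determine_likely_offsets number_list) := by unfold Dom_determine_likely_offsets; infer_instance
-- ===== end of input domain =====

-- B replaces A's descending-cutoff scan (rebuilding a dict comprehension per cutoff value) with one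
-- sort of the 255 counts and a single filter at the 6th-largest count; same cost class ("alternative").

-- ===== PORT A =====
def is_number_an_ascii_char (number : Int) : Bool :=
  (number ≥ 65 && number ≤ 90) || (number ≥ 97 && number ≤ 122) || (number == 32)
def un_offset (number offset : Int) : Int :=
  PySem.Int.mod (number + 256 - offset) 256
def pvLetterCounts (number_list : List Int) : PySem.Dict Int Int :=
  (PySem.List.pyRange 0 255 1).foldl
    (fun d offset =>
      d.insert offset (((number_list.map (fun x => un_offset x offset)).map is_number_an_ascii_char).count true : Int))
    PySem.Dict.empty
-- the dict comprehension '{k: v for i, (k, v) in enumerate(letter_counts.items()) if v >= cutoff}'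
-- (the enumerate index i is unused, so the fold runs over the items directly)
def pvLikely (lc : PySem.Dict Int Int) (cutoff : Int) : PySem.Dict Int Int :=
  lc.items.foldl (fun d p => if p.2 ≥ cutoff then d.insert p.1 p.2 else d) PySem.Dict.empty
-- the 'for cutoff in range(max(letter_counts.values()), 0, -1)' loop with its early return
def pvALoop (lc : PySem.Dict Int Int) : List Int → List (Int × Int)
  | [] => []
  | cutoff :: rest =>
      let likely := pvLikely lc cutoff
      if likely.size > 5 then likely.items else pvALoop lc rest
def determine_likely_offsets (number_list : List Int) : List (Int × Int) :=
  match PySem.List.max? (pvLetterCounts number_list).values (fun v => v) with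
  | none => []   -- unreachable: letter_counts always has 255 entries, so Python's max cannot raise here
  | some m => pvALoop (pvLetterCounts number_list) (PySem.List.pyRange m 0 (-1))
-- ===== PORT B =====
def pvIsLetterB (n : Int) : Bool :=
  (65 ≤ n && n ≤ 90) || (97 ≤ n && n ≤ 122) || (n == 32)
def pvCounts (number_list : List Int) : List Int :=
  (PySem.List.pyRange 0 255 1).map
    (fun off => ((number_list.countP (fun x => pvIsLetterB (PySem.Int.mod (x + 256 - off) 256)) : Nat) : Int))
-- sorted(counts, reverse=True)[5]: counts always has 255 elements, so index 5 is in range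
def pvThreshold (number_list : List Int) : Int :=
  PySem.List.pyGetD (PySem.List.sorted (pvCounts number_list) (fun v => v) true) 5 0
def determine_likely_offsets_alt (number_list : List Int) : List (Int × Int) :=
  if pvThreshold number_list < 1 then []
  -- dict comprehension over enumerate(counts): keys are distinct and ascending, so it is this filter
  else (PySem.List.enumerate (pvCounts number_list)).filter (fun p => p.2 ≥ pvThreshold number_list)


-- ===== PRECONDITION & SPEC =====
def Spec_determine_likely_offsets (number_list : List Int) (out : List (Int × Int)) : Prop := out = determine_likely_offsets_alt number_list
instance (number_list : List Int) (out : List (Int × Int)) : Decidable (Spec_determine_likely_offsets number_list out) := by unfold Spec_determine_likely_offsets; infer_instance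

-- ===== CLAIM (what is proved, stated in full; the proofs are below) =====
def Claim_equal_determine_likely_offsets : Prop := ∀ (number_list : List Int), Dom_determine_likely_offsets number_list → Spec_determine_likely_offsets number_list (determine_likely_offsets number_list)

-- ===== LEMMAS AND PROOFS =====

-- the per-offset letter count, as A computes it
def pvCnt (xs : List Int) (off : Int) : Int :=
  (((xs.map (fun x => un_offset x off)).map is_number_an_ascii_char).count true : Int)
theorem pvCnt_eq (xs : List Int) (off : Int) :
    ((xs.countP (fun x => pvIsLetterB (PySem.Int.mod (x + 256 - off) 256)) : Nat) : Int) = pvCnt xs off := by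
  unfold pvCnt
  rw [List.count_eq_countP, List.countP_map, List.countP_map]
  congr 1
  apply List.countP_congr
  intro x _
  simp [pvIsLetterB, is_number_an_ascii_char, un_offset, Function.comp, ge_iff_le]

theorem pvCounts_eq (xs : List Int) :
    pvCounts xs = (PySem.List.pyRange 0 255 1).map (pvCnt xs) := by
  unfold pvCounts; simp only [pvCnt_eq]

theorem pvItems_lc (xs : List Int) :
    (pvLetterCounts xs).items = (PySem.List.pyRange 0 255 1).map (fun off => (off, pvCnt xs off)) := by
  have h := PySem.Dict.items_foldl_insert_fresh (PySem.List.pyRange 0 255 1)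
    (fun off => off) (fun off => pvCnt xs off) PySem.Dict.empty
    (by intro a _; simp [PySem.Dict.contains_empty])
    (by simpa using PySem.List.nodup_pyRange_one 0 255)
  simpa [pvLetterCounts, pvCnt] using h

theorem pvFoldl_filter_insert (c : Int) :
    ∀ (l : List (Int × Int)) (d : PySem.Dict Int Int),
      (∀ p ∈ l, d.contains p.1 = false) → (l.map (·.1)).Nodup →
      (l.foldl (fun d p => if p.2 ≥ c then d.insert p.1 p.2 else d) d).items
        = d.items ++ l.filter (fun p => p.2 ≥ c) := by
  intro l
  induction l with
  | nil => intro d _ _; simp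
  | cons p l ih =>
      intro d hc hnd
      simp only [List.foldl_cons]
      simp only [List.map_cons, List.nodup_cons] at hnd
      by_cases hp : p.2 ≥ c
      · rw [if_pos hp, ih (d.insert p.1 p.2)
          (by intro q hq
              rw [PySem.Dict.contains_insert]
              have : q.1 ≠ p.1 := fun h => hnd.1 (h ▸ List.mem_map_of_mem hq)
              simp [this, hc q (List.mem_cons_of_mem _ hq)])
          hnd.2]
        rw [PySem.Dict.items_insert_of_not_contains d p.2 (hc p (List.mem_cons_self))]
        simp [hp]
      · rw [if_neg hp, ih d (fun q hq => hc q (List.mem_cons_of_mem _ hq)) hnd.2]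
        simp [hp]

theorem pvLikely_items (lc : PySem.Dict Int Int) (c : Int)
    (hnd : (lc.items.map (·.1)).Nodup) :
    (pvLikely lc c).items = lc.items.filter (fun p => p.2 ≥ c) := by
  unfold pvLikely
  rw [pvFoldl_filter_insert c lc.items PySem.Dict.empty
    (by intro p _; simp [PySem.Dict.contains_empty]) hnd]
  simp [PySem.Dict.empty]

theorem pvTake_mem_ge (s : List Int) (h : List.Pairwise (fun a b => b ≤ a) s)
    (h6 : 5 < s.length) : ∀ x ∈ s.take 6, s[5] ≤ x := by
  intro x hx
  rw [List.mem_take_iff_getElem] at hx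
  obtain ⟨i, hi, rfl⟩ := hx
  have hi5 : i ≤ 5 := by omega
  rcases eq_or_lt_of_le hi5 with h5 | h5
  · simp [h5]
  · exact (List.pairwise_iff_getElem.mp h i 5 (by omega) h6 h5)

theorem pvDrop_mem_le (s : List Int) (h : List.Pairwise (fun a b => b ≤ a) s)
    (h6 : 5 < s.length) : ∀ x ∈ s.drop 5, x ≤ s[5] := by
  intro x hx
  rw [List.mem_iff_getElem] at hx
  obtain ⟨i, hi, rfl⟩ := hx
  rw [List.getElem_drop]
  rcases Nat.eq_zero_or_pos i with h0 | h0
  · simp [h0]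
  · exact (List.pairwise_iff_getElem.mp h 5 (5 + i) h6 (by simp at hi; omega) (by omega))

theorem pvSorted_count_ge (s : List Int) (h : List.Pairwise (fun a b => b ≤ a) s)
    (h6 : 5 < s.length) (c : Int) (hc : c ≤ s[5]) :
    6 ≤ s.countP (fun v => v ≥ c) := by
  have heq : (s.take 6).countP (fun v => v ≥ c) = (s.take 6).length := by
    apply List.countP_eq_length.mpr
    intro x hx
    exact decide_eq_true (le_trans hc (pvTake_mem_ge s h h6 x hx))
  calc 6 = (s.take 6).length := by rw [List.length_take]; omega
    _ = (s.take 6).countP (fun v => v ≥ c) := heq.symm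
    _ ≤ s.countP (fun v => v ≥ c) := by
        conv_rhs => rw [← List.take_append_drop 6 s]
        rw [List.countP_append]; omega

theorem pvSorted_count_le (s : List Int) (h : List.Pairwise (fun a b => b ≤ a) s)
    (h6 : 5 < s.length) (c : Int) (hc : s[5] < c) :
    s.countP (fun v => v ≥ c) ≤ 5 := by
  have hdrop : (s.drop 5).countP (fun v => v ≥ c) = 0 := by
    apply List.countP_eq_zero.mpr
    intro x hx
    simp only [decide_eq_true_eq]
    intro hge
    exact absurd (le_trans hge (pvDrop_mem_le s h h6 x hx)) (not_le.mpr hc)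
  have htake : (s.take 5).countP (fun v => v ≥ c) ≤ 5 := by
    calc (s.take 5).countP (fun v => v ≥ c) ≤ (s.take 5).length := List.countP_le_length
      _ ≤ 5 := by rw [List.length_take]; omega
  conv_lhs => rw [← List.take_append_drop 5 s]
  rw [List.countP_append]; omega

theorem pvALoop_spec (lc : PySem.Dict Int Int) (t : Int)
    (hsz : ∀ c, t < c → (pvLikely lc c).size ≤ 5)
    (hhit : 1 ≤ t → (pvLikely lc t).size > 5) :
    ∀ (k : Nat) (a : Int), a ≤ (k : Int) → (1 ≤ t → t ≤ a) →
      pvALoop lc (PySem.List.pyRange a 0 (-1))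
        = if 1 ≤ t then (pvLikely lc t).items else [] := by
  intro k
  induction k with
  | zero =>
      intro a ha hta
      have ht : ¬ 1 ≤ t := fun h => by have := hta h; omega
      rw [PySem.List.pyRange_neg_one_eq_nil (by omega), if_neg ht]
      rfl
  | succ k ih =>
      intro a ha hta
      by_cases h0 : a ≤ 0
      · have ht : ¬ 1 ≤ t := fun h => by have := hta h; omega
        rw [PySem.List.pyRange_neg_one_eq_nil h0, if_neg ht]
        rfl
      · rw [PySem.List.pyRange_neg_one_cons (by omega)]
        show (if (pvLikely lc a).size > 5 then (pvLikely lc a).items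
              else pvALoop lc (PySem.List.pyRange (a - 1) 0 (-1))) = _
        by_cases hlt : t < a
        · rw [if_neg (by have := hsz a hlt; omega)]
          exact ih (a - 1) (by omega) (fun h => by have := hta h; omega)
        · have h1t : 1 ≤ t := by omega
          have : t = a := le_antisymm (hta h1t) (by omega)
          subst this
          rw [if_pos (hhit h1t), if_pos h1t]

theorem pvMax_isSome (x : Int) (xs : List Int) :
    (PySem.List.max? (x :: xs) (fun v => v)).isSome := by
  unfold PySem.List.max?
  rw [List.foldl_cons]
  induction xs generalizing x with
  | nil => rfl
  | cons y ys ih =>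
      rw [List.foldl_cons]
      show (List.foldl _ (if x < y then some y else some x) ys).isSome = true
      split
      · exact ih y
      · exact ih x

theorem determine_likely_offsets_main (xs : List Int) :
    determine_likely_offsets xs = determine_likely_offsets_alt xs := by
  have hitems := pvItems_lc xs
  have hnd : ((pvLetterCounts xs).items.map (·.1)).Nodup := by
    rw [hitems, List.map_map]
    have hid : ((·.1) ∘ fun off : Int => (off, pvCnt xs off)) = id := rfl
    rw [hid, List.map_id]
    exact PySem.List.nodup_pyRange_one 0 255
  have hvals : (pvLetterCounts xs).values = pvCounts xs := by
    show (pvLetterCounts xs).items.map (·.2) = _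
    rw [hitems, List.map_map, pvCounts_eq]
    rfl
  have hclen : (pvCounts xs).length = 255 := by
    rw [pvCounts_eq, List.length_map, PySem.List.length_pyRange_one]
    decide
  set s := PySem.List.sorted (pvCounts xs) (fun v => v) true with hs
  have hslen : s.length = 255 := by
    rw [hs, PySem.List.length_sorted, hclen]
  have hperm : s.Perm (pvCounts xs) := PySem.List.sorted_perm _ _ _
  have hpair : List.Pairwise (fun a b => b ≤ a) s := PySem.List.sorted_pairwise_rev _ _
  have h6 : 5 < s.length := by omega
  have ht5 : pvThreshold xs = s[5] := by
    unfold pvThreshold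
    rw [← hs, PySem.List.pyGetD_ofNat', List.getD_eq_getElem _ _ (by omega)]
  set t := pvThreshold xs with htdef
  have hsize : ∀ c, (pvLikely (pvLetterCounts xs) c).size = s.countP (fun v => v ≥ c) := by
    intro c
    show (pvLikely (pvLetterCounts xs) c).items.length = _
    rw [pvLikely_items _ _ hnd, hitems, ← List.countP_eq_length_filter, List.countP_map, hperm.countP_eq, pvCounts_eq, List.countP_map]
    rfl
  have hsz : ∀ c, t < c → (pvLikely (pvLetterCounts xs) c).size ≤ 5 := by
    intro c hc
    rw [hsize]
    exact pvSorted_count_le s hpair h6 c (ht5 ▸ hc)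
  have hhit : 1 ≤ t → (pvLikely (pvLetterCounts xs) t).size > 5 := by
    intro h1
    rw [hsize]
    have := pvSorted_count_ge s hpair h6 t (le_of_eq ht5)
    omega
  obtain ⟨y, ys, hys⟩ : ∃ y ys, pvCounts xs = y :: ys := by
    cases h : pvCounts xs with
    | nil => rw [h] at hclen; simp at hclen
    | cons y ys => exact ⟨y, ys, rfl⟩
  unfold determine_likely_offsets determine_likely_offsets_alt
  rw [hvals, ← htdef]
  cases hmax : PySem.List.max? (pvCounts xs) (fun v => v) with
  | none =>
      exfalso
      have := pvMax_isSome y ys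
      rw [← hys, hmax] at this
      simp at this
  | some m =>
      show pvALoop (pvLetterCounts xs) (PySem.List.pyRange m 0 (-1)) = _
      have hismax : ∀ v ∈ pvCounts xs, v ≤ m := PySem.List.max?_isMax hmax
      have htmem : t ∈ pvCounts xs := by
        rw [ht5]
        exact hperm.mem_iff.mp (List.getElem_mem h6)
      have htm : t ≤ m := hismax t htmem
      rw [pvALoop_spec (pvLetterCounts xs) t hsz hhit m.toNat m (Int.self_le_toNat m) (fun _ => htm)]
      by_cases h1 : 1 ≤ t
      · rw [if_pos h1, if_neg (by omega)]
        rw [pvLikely_items _ _ hnd, hitems]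
        have hlen : PySem.List.len (pvCounts xs) = 255 := by
          rw [PySem.List.len_eq, hclen]; rfl
        have henum : PySem.List.enumerate (pvCounts xs)
            = (PySem.List.pyRange 0 255 1).map (fun o => (o, pvCnt xs o)) := by
          rw [PySem.List.enumerate_eq_map_pyRange (pvCounts xs) 0, hlen]
          apply List.map_congr_left
          intro j hj
          have hjm := (PySem.List.mem_pyRange_one).mp hj
          rw [pvCounts_eq, PySem.List.pyGetD_map_pyRange_of_nonneg _ 255 j 0 hjm.1 hjm.2]
        rw [henum]
      · rw [if_neg h1, if_pos (by omega)]

-- ===== VERDICT (by name: the statement is the Claim_ definition above) =====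
theorem determine_likely_offsets_spec : Claim_equal_determine_likely_offsets := by
  intro xs _
  unfold Spec_determine_likely_offsets
  exact determine_likely_offsets_main xs
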